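-- pv_equiv track=rewrite | github.com/intel/event-converter-for-linux-perf | perfjson.py | del_dup_events
-- ===== SOURCE A (Python) =====
-- def del_dup_events(jf):
--     events = {}
--     for i in range(len(jf)):
--         name = jf[i]["EventName"]
--         if name not in events.keys():
--             events[name] = jf[i]
--         else:
--             if "BriefDescription" in events[name] and "TBD" in events[name]["BriefDescription"]:
--                 if "TBD" not in jf[i]["BriefDescription"]:
--                     events[name] = jf[i]
--     jf = events.values()
--     return jf
-- ===== SOURCE B (Python) =====
-- def del_dup_events(jf):
--     # Group events by name in one pass, then pick one representative per group.
--     groups = {}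
--     for ev in jf:
--         groups.setdefault(ev["EventName"], []).append(ev)
--     best = {}
--     for name, evs in groups.items():
--         pick = evs[0]
--         for ev in evs[1:]:
--             if "BriefDescription" in pick and "TBD" in pick["BriefDescription"] \
--                     and "TBD" not in ev["BriefDescription"]:
--                 pick = ev
--         best[name] = pick
--     return best.values()
-- ===== Notes on version B (the rewrite author's own statement) =====
-- stated objective: alternative
-- what changed: A makes one index loop over the list, keeping a name-keyed dict that it conditionally overwrites in place; B first groups the events by name into lists (one pass with setdefault), then folds each group independently to its representative and rebuilds the result dict from the groups.
import Mathlib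
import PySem

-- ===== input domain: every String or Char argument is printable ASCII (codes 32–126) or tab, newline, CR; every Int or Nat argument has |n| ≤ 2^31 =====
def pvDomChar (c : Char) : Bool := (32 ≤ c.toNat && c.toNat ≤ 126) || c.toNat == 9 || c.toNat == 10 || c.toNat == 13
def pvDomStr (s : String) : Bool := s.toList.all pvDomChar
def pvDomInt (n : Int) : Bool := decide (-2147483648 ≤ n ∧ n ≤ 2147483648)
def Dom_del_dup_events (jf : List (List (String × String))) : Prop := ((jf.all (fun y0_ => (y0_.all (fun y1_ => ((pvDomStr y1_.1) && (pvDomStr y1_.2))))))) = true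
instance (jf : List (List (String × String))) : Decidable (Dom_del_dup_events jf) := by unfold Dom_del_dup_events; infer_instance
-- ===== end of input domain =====

-- B re-implements A by a different decomposition (group by name, then fold each group to a
-- representative) instead of A's single index loop updating a dict in place; same return value.

-- ===== PORT A =====
-- loop body of A's 'for i in range(len(jf))' (applied to ei = jf[i])
def pvStepA (events : PySem.Dict String (List (String × String)))
    (ei : List (String × String)) : PySem.Dict String (List (String × String)) :=
  -- name = jf[i]["EventName"]  (Pre_ rules out a missing "EventName" key)
  let name := (PySem.Dict.mk ei).getD "EventName" ""
  if (events.keys.contains name) = false then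
    events.insert name ei
  else
    if (PySem.Dict.mk (events.getD name [])).contains "BriefDescription" &&
        PySem.Str.isIn "TBD" ((PySem.Dict.mk (events.getD name [])).getD "BriefDescription" "") then
      -- "TBD" not in jf[i]["BriefDescription"]  (Pre_ rules out the KeyError here)
      if PySem.Str.isIn "TBD" ((PySem.Dict.mk ei).getD "BriefDescription" "") = false then
        events.insert name ei
      else events
    else events

def del_dup_events (jf : List (List (String × String))) : List (List (String × String)) :=
  let events : PySem.Dict String (List (String × String)) :=
    (PySem.List.pyRange 0 (jf.length : Int)).foldl
      (fun events i => pvStepA events (PySem.List.pyGetD jf i [])) PySem.Dict.empty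
  events.values

-- ===== PORT B =====
-- pick = evs[0]; for ev in evs[1:]: replace pick if it is a TBD one and ev is not
-- (evs is never empty where this is called, so headD's default is unreachable)
def pvPick (evs : List (List (String × String))) : List (String × String) :=
  (evs.drop 1).foldl
    (fun pick ev =>
      if (PySem.Dict.mk pick).contains "BriefDescription" &&
          PySem.Str.isIn "TBD" ((PySem.Dict.mk pick).getD "BriefDescription" "") &&
          !(PySem.Str.isIn "TBD" ((PySem.Dict.mk ev).getD "BriefDescription" "")) then ev
      else pick)
    (evs.headD [])

def del_dup_events_alt (jf : List (List (String × String))) : List (List (String × String)) :=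
  let groups : PySem.Dict String (List (List (String × String))) :=
    jf.foldl
      (fun groups ev =>
        -- groups.setdefault(ev["EventName"], []).append(ev)
        groups.modify ((PySem.Dict.mk ev).getD "EventName" "") [] (fun evs => evs ++ [ev]))
      PySem.Dict.empty
  let best : PySem.Dict String (List (String × String)) :=
    groups.items.foldl (fun best p => best.insert p.1 (pvPick p.2)) PySem.Dict.empty
  best.values

-- ===== PRECONDITION & SPEC =====
-- helpers for Pre_ (read the event dict directly; they are not used by either port)
def pvHasKey (e : List (String × String)) (k : String) : Bool := (PySem.Dict.mk e).contains k
def pvName (e : List (String × String)) : String := (PySem.Dict.mk e).getD "EventName" ""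
def pvIsTBD (e : List (String × String)) : Bool :=
  pvHasKey e "BriefDescription" && PySem.Str.isIn "TBD" ((PySem.Dict.mk e).getD "BriefDescription" "")

-- Pre_ excludes exactly the inputs where the Python A raises a KeyError: an event without
-- "EventName", or an event without "BriefDescription" whose name was seen before and whose
-- currently stored event (= the first occurrence, not yet replaced by a non-TBD one) is a TBD one.
def Pre_del_dup_events (jf : List (List (String × String))) : Prop :=
  (∀ e ∈ jf, pvHasKey e "EventName" = true) ∧
  ¬ ∃ i ∈ List.range jf.length, pvHasKey (jf.getD i []) "BriefDescription" = false ∧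
      ∃ f ∈ List.range i, pvName (jf.getD f []) = pvName (jf.getD i []) ∧
        pvIsTBD (jf.getD f []) = true ∧
        (∀ j ∈ List.range f, pvName (jf.getD j []) ≠ pvName (jf.getD f [])) ∧
        (∀ j ∈ List.range i, f < j → pvName (jf.getD j []) = pvName (jf.getD i []) →
          pvIsTBD (jf.getD j []) = true)
instance (jf : List (List (String × String))) : Decidable (Pre_del_dup_events jf) := by
  unfold Pre_del_dup_events; infer_instance

def pvWitness_del_dup_events : (List (List (String × String))) :=
  [[("EventName", "cycles"), ("BriefDescription", "TBD")],
   [("EventName", "cycles"), ("BriefDescription", "Counts cycles")],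
   [("EventName", "instructions")]]

def Spec_del_dup_events (jf : List (List (String × String))) (out : List (List (String × String))) : Prop := out = del_dup_events_alt jf
instance (jf : List (List (String × String))) (out : List (List (String × String))) : Decidable (Spec_del_dup_events jf out) := by unfold Spec_del_dup_events; infer_instance

-- ===== CLAIM (what is proved, stated in full; the proofs are below) =====
def Claim_equal_del_dup_events : Prop := ∀ (jf : List (List (String × String))), Dom_del_dup_events jf → Pre_del_dup_events jf → Spec_del_dup_events jf (del_dup_events jf)

-- ===== LEMMAS AND PROOFS =====

-- abbreviations for the proofs
def pvG (l : List (List (String × String))) : PySem.Dict String (List (List (String × String))) :=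
  l.foldl (fun g ev => g.modify ((PySem.Dict.mk ev).getD "EventName" "") [] (fun evs => evs ++ [ev]))
    PySem.Dict.empty

def pvM (g : PySem.Dict String (List (List (String × String)))) :
    PySem.Dict String (List (String × String)) :=
  PySem.Dict.mk (g.items.map (fun p => (p.1, pvPick p.2)))

lemma pv_keys_contains (d : PySem.Dict String (List (String × String))) (k : String) :
    d.keys.contains k = d.contains k := by
  rw [Bool.eq_iff_iff]
  rw [PySem.Dict.contains_iff_mem_keys]
  exact List.contains_iff_mem

lemma pv_insert_getD_self (d : PySem.Dict String (List (String × String))) (k : String)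
    (hnd : d.keys.Nodup) (hc : d.contains k = true) : d.insert k (d.getD k []) = d := by
  apply PySem.Dict.ext
  rw [PySem.Dict.items_insert_of_contains d _ hc]
  have h : ∀ p ∈ d.items, (if (p.1 == k) = true then (k, d.getD k []) else p) = p := by
    intro p hp
    by_cases h : p.1 = k
    · subst h
      have hv := PySem.Dict.getD_of_mem_items d (k := p.1) (v := p.2) (by simpa using hp) hnd []
      simp [hv]
    · simp [h]
  exact (List.map_congr_left h).trans (List.map_id _)

-- A's loop body, rewritten as one insert
lemma pvStepA_eq (d : PySem.Dict String (List (String × String))) (e : List (String × String))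
    (hnd : d.keys.Nodup) :
    pvStepA d e =
      if d.contains (pvName e) then
        d.insert (pvName e)
          (if pvIsTBD (d.getD (pvName e) []) &&
              !(PySem.Str.isIn "TBD" ((PySem.Dict.mk e).getD "BriefDescription" "")) then e
           else d.getD (pvName e) [])
      else d.insert (pvName e) e := by
  simp only [pvStepA, pvName, pvIsTBD, pvHasKey]
  rw [pv_keys_contains]
  cases hc : d.contains ((PySem.Dict.mk e).getD "EventName" "") with
  | false => simp
  | true =>
    cases h1 : ((PySem.Dict.mk (d.getD ((PySem.Dict.mk e).getD "EventName" "") [])).contains "BriefDescription" &&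
        PySem.Str.isIn "TBD" ((PySem.Dict.mk (d.getD ((PySem.Dict.mk e).getD "EventName" "") [])).getD "BriefDescription" "")) with
    | false => simp [pv_insert_getD_self d _ hnd hc]
    | true =>
      cases h2 : PySem.Str.isIn "TBD" ((PySem.Dict.mk e).getD "BriefDescription" "") with
      | false => simp
      | true => simp [pv_insert_getD_self d _ hnd hc]

lemma pvG_nodup (l : List (List (String × String))) : (pvG l).keys.Nodup := by
  unfold pvG
  have h := PySem.Dict.nodup_keys_foldl_modify_key l
      (fun ev => (PySem.Dict.mk ev).getD "EventName" "") []
      (fun _ ev evs => evs ++ [ev]) PySem.Dict.empty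
      (by simp [PySem.Dict.keys, PySem.Dict.empty])
  simpa using h

lemma pvG_getD (l : List (List (String × String))) (k : String) :
    (pvG l).getD k [] = l.filter (fun ev => pvName ev == k) := by
  unfold pvG
  rw [show l.foldl (fun g ev => g.modify ((PySem.Dict.mk ev).getD "EventName" "") [] (fun evs => evs ++ [ev])) PySem.Dict.empty
      = (l.map (fun ev => (((PySem.Dict.mk ev).getD "EventName" "" : String), ev))).foldl
          (fun d p => d.modify p.1 [] (fun x => x ++ [p.2])) PySem.Dict.empty by rw [List.foldl_map]]
  rw [PySem.Dict.getD_foldl_modify_append]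
  simp [List.filter_map, Function.comp_def, pvName]

lemma pvM_keys (g : PySem.Dict String (List (List (String × String)))) :
    (pvM g).keys = g.keys := by
  simp [pvM, PySem.Dict.keys, List.map_map, Function.comp_def]

lemma pvM_contains (g : PySem.Dict String (List (List (String × String)))) (k : String) :
    (pvM g).contains k = g.contains k := by
  simp [pvM, PySem.Dict.contains, List.any_map, Function.comp_def]

lemma pvM_insert (g : PySem.Dict String (List (List (String × String)))) (k : String)
    (v : List (List (String × String))) :
    pvM (g.insert k v) = (pvM g).insert k (pvPick v) := by
  cases hc : g.contains k with
  | false =>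
    apply PySem.Dict.ext
    rw [PySem.Dict.items_insert_of_not_contains (pvM g) _ (by rw [pvM_contains]; exact hc)]
    simp only [pvM]
    rw [PySem.Dict.items_insert_of_not_contains g _ hc]
    simp
  | true =>
    apply PySem.Dict.ext
    rw [PySem.Dict.items_insert_of_contains (pvM g) _ (by rw [pvM_contains]; exact hc)]
    simp only [pvM]
    rw [PySem.Dict.items_insert_of_contains g _ hc]
    simp only [List.map_map]
    apply List.map_congr_left
    intro p hp
    by_cases h : p.1 = k <;> simp [h]

lemma pvM_getD (g : PySem.Dict String (List (List (String × String)))) (k : String)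
    (hnd : g.keys.Nodup) (hc : g.contains k = true) :
    (pvM g).getD k [] = pvPick (g.getD k []) := by
  obtain ⟨v, hv⟩ : ∃ v, g.get? k = some v := by
    cases hvv : g.get? k with
    | none =>
      rw [PySem.Dict.get?_eq_none_iff_contains] at hvv
      rw [hvv] at hc
      exact absurd hc (by simp)
    | some v => exact ⟨v, rfl⟩
  have hmem := PySem.Dict.mem_items_of_get?_eq_some g hv
  have hmem' : (k, pvPick v) ∈ (pvM g).items := by
    simp only [pvM]
    exact List.mem_map.mpr ⟨(k, v), hmem, rfl⟩
  rw [PySem.Dict.getD_of_mem_items (pvM g) hmem' (by rw [pvM_keys]; exact hnd) []]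
  rw [PySem.Dict.getD_eq_get?_getD, hv]
  rfl

lemma pvPick_append (xs : List (List (String × String))) (e : List (String × String))
    (hne : xs ≠ []) :
    pvPick (xs ++ [e]) =
      (if pvIsTBD (pvPick xs) &&
          !(PySem.Str.isIn "TBD" ((PySem.Dict.mk e).getD "BriefDescription" "")) then e
       else pvPick xs) := by
  cases xs with
  | nil => exact absurd rfl hne
  | cons p rest =>
    simp [pvPick, List.foldl_append, pvIsTBD, pvHasKey, Bool.and_assoc]

-- main invariant: A's dict after l equals B's per-group picks of l's groups
lemma pv_main (l : List (List (String × String))) :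
    l.foldl pvStepA PySem.Dict.empty = pvM (pvG l) := by
  induction l using List.reverseRecOn with
  | nil => rfl
  | append_singleton l e ih =>
    rw [List.foldl_append, List.foldl_cons, List.foldl_nil, ih]
    have hG : pvG (l ++ [e]) = (pvG l).insert (pvName e) ((pvG l).getD (pvName e) [] ++ [e]) := by
      unfold pvG
      rw [List.foldl_append, List.foldl_cons, List.foldl_nil]
      rfl
    rw [hG, pvM_insert]
    rw [pvStepA_eq _ e (by rw [pvM_keys]; exact pvG_nodup l)]
    rw [pvM_contains]
    cases hc : (pvG l).contains (pvName e) with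
    | false =>
      rw [PySem.Dict.getD_of_not_contains (pvG l) [] hc]
      rfl
    | true =>
      rw [pvM_getD (pvG l) (pvName e) (pvG_nodup l) hc]
      have hkeys : (pvG l).keys = PySem.Set.ofList (l.map pvName) := by
        unfold pvG
        have h := PySem.Dict.keys_foldl_modify_key l
            (fun ev => (PySem.Dict.mk ev).getD "EventName" "") []
            (fun _ ev evs => evs ++ [ev]) PySem.Dict.empty
        rw [PySem.Set.ofList_eq_foldl]
        simpa [PySem.Dict.keys, PySem.Dict.empty, PySem.Set.update, pvName] using h
      have hmm : pvName e ∈ l.map pvName := by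
        have h := (PySem.Dict.contains_iff_mem_keys (pvG l) (pvName e)).mp hc
        rw [hkeys] at h
        exact (PySem.Set.mem_ofList _ _).mp h
      obtain ⟨ev, hev, hevn⟩ := List.mem_map.mp hmm
      have hne : (pvG l).getD (pvName e) [] ≠ [] := by
        rw [pvG_getD]
        intro hnil
        have hm : ev ∈ l.filter (fun x => pvName x == pvName e) :=
          List.mem_filter.mpr ⟨hev, by simp [hevn]⟩
        rw [hnil] at hm
        exact absurd hm (List.not_mem_nil)
      rw [pvPick_append _ e hne]
      rfl

lemma pvA_eq (jf : List (List (String × String))) :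
    del_dup_events jf = (jf.foldl pvStepA PySem.Dict.empty).values := by
  show ((PySem.List.pyRange 0 (jf.length : Int)).foldl
      (fun events i => pvStepA events (PySem.List.pyGetD jf i [])) PySem.Dict.empty).values = _
  rw [PySem.List.foldl_pyRange_pyGetD' (a := 0) jf [] pvStepA PySem.Dict.empty (by norm_num)]
  simp

lemma pvB_eq (jf : List (List (String × String))) :
    del_dup_events_alt jf = (pvM (pvG jf)).values := by
  show ((pvG jf).items.foldl (fun best p => best.insert p.1 (pvPick p.2)) PySem.Dict.empty).values = _
  have h := PySem.Dict.items_foldl_insert_fresh (pvG jf).items Prod.fst (fun p => pvPick p.2)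
      PySem.Dict.empty (by intro a _; simp [PySem.Dict.contains, PySem.Dict.empty])
      (by have := pvG_nodup jf; simpa [PySem.Dict.keys] using this)
  have heq : (pvG jf).items.foldl (fun best p => best.insert p.1 (pvPick p.2)) PySem.Dict.empty
      = pvM (pvG jf) := by
    apply PySem.Dict.ext
    simpa [pvM] using h
  rw [heq]

-- ===== VERDICT (by name: the statement is the Claim_ definition above) =====
theorem del_dup_events_spec : Claim_equal_del_dup_events := by
  intro jf _ _
  unfold Spec_del_dup_events
  rw [pvA_eq, pvB_eq, pv_main]
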